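-- pv_equiv track=rewrite | github.com/dedsec1121fk/DedSec | Scripts/DedSec Market.py | is_noise_block
-- ===== SOURCE A (Python) =====
-- def is_noise_block(block):
--     low = block.lower().strip()
--     stop_headings = [
--         "repository structure", "what each part does", "termux download",
--         "install", "run and update", "main script features", "final note",
--         "license", "contributing", "usage", "requirements"
--     ]
--     return any(low == item or low.startswith(item + ":") for item in stop_headings)
-- ===== SOURCE B (Python) =====
-- _BY_FIRST_WORD = {
--     "repository": "repository structure",
--     "what": "what each part does",
--     "termux": "termux download",
--     "install": "install",
--     "run": "run and update",
--     "main": "main script features",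
--     "final": "final note",
--     "license": "license",
--     "contributing": "contributing",
--     "usage": "usage",
--     "requirements": "requirements",
-- }
--
--
-- def is_noise_block(block):
--     low = block.lower().strip()
--     word = []
--     for ch in low:
--         if not ch.isalpha():
--             break
--         word.append(ch)
--     heading = _BY_FIRST_WORD.get("".join(word))
--     if heading is None:
--         return False
--     return low == heading or low.startswith(heading + ":")
-- ===== Notes on version B (the rewrite author's own statement) =====
-- stated objective: alternative
-- what changed: B indexes the headings by their first word in a dict built once: it extracts the leading alphabetic run of the normalized text, looks up the single candidate heading by that word, and verifies only that one candidate, so A's scan over all 11 headings with an equality and a startswith test per heading disappears; correct because the 11 headings have pairwise distinct first words.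
import Mathlib
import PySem

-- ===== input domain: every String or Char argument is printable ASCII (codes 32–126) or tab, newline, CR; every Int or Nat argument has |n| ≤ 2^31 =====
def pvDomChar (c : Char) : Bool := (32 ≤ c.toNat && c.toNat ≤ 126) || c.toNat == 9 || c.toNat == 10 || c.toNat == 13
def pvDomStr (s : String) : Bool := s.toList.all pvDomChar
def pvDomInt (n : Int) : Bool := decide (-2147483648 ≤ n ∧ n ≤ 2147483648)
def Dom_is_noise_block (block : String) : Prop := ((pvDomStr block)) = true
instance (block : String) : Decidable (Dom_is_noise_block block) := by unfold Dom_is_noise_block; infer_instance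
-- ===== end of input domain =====

-- B indexes the headings by their (pairwise distinct) first words in a dict built once and
-- verifies the single candidate found for the text's leading alphabetic run, replacing A's
-- scan over all 11 headings; objective: alternative (same cost, inner scan removed).

-- ===== PORT A =====
def is_noise_block (block : String) : Bool :=
  let low := PySem.Str.strip (PySem.Str.lower block)
  let stopHeadings : List String :=
    ["repository structure", "what each part does", "termux download",
     "install", "run and update", "main script features", "final note",
     "license", "contributing", "usage", "requirements"]
  stopHeadings.any (fun item => low == item || PySem.Str.startswith low (item ++ ":"))

-- ===== PORT B =====
-- the 'for ch in low: if not ch.isalpha(): break; word += ch' loop of Source B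
def pvLeadingAlpha : List Char → List Char
  | [] => []
  | c :: rest => if PySem.Chars.isalpha c then c :: pvLeadingAlpha rest else []

def pvByFirstWord : PySem.Dict String String := PySem.Dict.ofList
  [("repository", "repository structure"), ("what", "what each part does"),
   ("termux", "termux download"), ("install", "install"), ("run", "run and update"),
   ("main", "main script features"), ("final", "final note"), ("license", "license"),
   ("contributing", "contributing"), ("usage", "usage"), ("requirements", "requirements")]

def is_noise_block_alt (block : String) : Bool :=
  let low := PySem.Str.strip (PySem.Str.lower block)
  let word := String.ofList (pvLeadingAlpha low.toList)
  match pvByFirstWord.get? word with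
  | none => false
  | some heading => low == heading || PySem.Str.startswith low (heading ++ ":")

-- ===== PRECONDITION & SPEC =====
def Spec_is_noise_block (block : String) (out : Bool) : Prop := out = is_noise_block_alt block
instance (block : String) (out : Bool) : Decidable (Spec_is_noise_block block out) := by unfold Spec_is_noise_block; infer_instance

-- ===== CLAIM (what is proved, stated in full; the proofs are below) =====
def Claim_equal_is_noise_block : Prop := ∀ (block : String), Dom_is_noise_block block → Spec_is_noise_block block (is_noise_block block)

-- ===== LEMMAS AND PROOFS =====

-- appending anything after a ':' does not change the leading alphabetic run
theorem pvLeadingAlpha_append_colon (L t : List Char) :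
    pvLeadingAlpha (L ++ ':' :: t) = pvLeadingAlpha L := by
  induction L with
  | nil => simp [pvLeadingAlpha]; decide
  | cons c rest ih =>
      simp only [List.cons_append, pvLeadingAlpha]
      by_cases h : PySem.Chars.isalpha c = true
      · rw [if_pos h, if_pos h, ih]
      · rw [if_neg h, if_neg h]

-- A's per-item test forces the leading alphabetic run of low to be that of the item
theorem pv_test_leading (low item : String)
    (h : (low == item || PySem.Str.startswith low (item ++ ":")) = true) :
    pvLeadingAlpha low.toList = pvLeadingAlpha item.toList := by
  rw [Bool.or_eq_true] at h
  rcases h with h | h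
  · rw [beq_iff_eq] at h; rw [h]
  · rw [PySem.Str.startswith_eq] at h
    obtain ⟨t, ht⟩ := (PySem.Chars.startswith_iff _ _).1 h
    have hlow : low.toList = item.toList ++ ':' :: t := by
      rw [← ht]; simp
    rw [hlow, pvLeadingAlpha_append_colon]

-- a value produced by the first-word dict is one of A's headings
set_option maxHeartbeats 2000000 in
theorem pv_get_mem (w h : String) (hget : pvByFirstWord.get? w = some h) :
    h ∈ (["repository structure", "what each part does", "termux download",
     "install", "run and update", "main script features", "final note",
     "license", "contributing", "usage", "requirements"] : List String) := by
  have hmk : pvByFirstWord = PySem.Dict.mk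
    [("repository", "repository structure"), ("what", "what each part does"),
     ("termux", "termux download"), ("install", "install"), ("run", "run and update"),
     ("main", "main script features"), ("final", "final note"), ("license", "license"),
     ("contributing", "contributing"), ("usage", "usage"), ("requirements", "requirements")] := by
    rfl
  rw [hmk] at hget
  simp only [PySem.Dict.get?_mk_cons] at hget
  split_ifs at hget <;>
    first
      | (simp only [Option.some.injEq] at hget; subst hget; decide)
      | (simp [PySem.Dict.get?] at hget)

-- looking up a heading's own first word returns that heading (first words are distinct)
set_option maxHeartbeats 2000000 in
theorem pv_lookup : ∀ item ∈ (["repository structure", "what each part does", "termux download",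
     "install", "run and update", "main script features", "final note",
     "license", "contributing", "usage", "requirements"] : List String),
    pvByFirstWord.get? (String.ofList (pvLeadingAlpha item.toList)) = some item := by
  decide

-- the two programs agree on any already-normalized text
theorem pv_main (low : String) :
    ((["repository structure", "what each part does", "termux download",
       "install", "run and update", "main script features", "final note",
       "license", "contributing", "usage", "requirements"] : List String).any
      (fun item => low == item || PySem.Str.startswith low (item ++ ":"))) =
    (match pvByFirstWord.get? (String.ofList (pvLeadingAlpha low.toList)) with
     | none => false
     | some heading => low == heading || PySem.Str.startswith low (heading ++ ":")) := by
  rw [Bool.eq_iff_iff, List.any_eq_true]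
  constructor
  · rintro ⟨item, hmem, hcond⟩
    have hword := pv_test_leading low item hcond
    rw [hword, pv_lookup item hmem]
    exact hcond
  · intro hB
    rcases hget : pvByFirstWord.get? (String.ofList (pvLeadingAlpha low.toList)) with _ | h
    · rw [hget] at hB; exact absurd hB (by simp)
    · rw [hget] at hB
      exact ⟨h, pv_get_mem _ h hget, hB⟩

-- ===== VERDICT (by name: the statement is the Claim_ definition above) =====
theorem is_noise_block_spec : Claim_equal_is_noise_block := by
  intro block _
  show is_noise_block block = is_noise_block_alt block
  simp only [is_noise_block, is_noise_block_alt]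
  exact pv_main (PySem.Str.strip (PySem.Str.lower block))
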